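-- pv_equiv track=rewrite | github.com/Sandeep-kumaresan/Leetcode | second.py | nearest_smallest_and_greatest
-- ===== SOURCE A (Python) =====
-- from typing import List
--
-- def nearest_smallest_and_greatest(arr: List[int]) -> List[List[str]]:
--     nearest_smallest = []
--     nearest_greatest = []
--
--     for i in range(len(arr) - 1):
--         pair_sum = arr[i] + arr[i + 1]
--
--         # Find nearest smallest
--         smallest = None
--         for num in arr:
--             if num < pair_sum:
--                 if smallest is None or num > smallest:
--                     smallest = num
--
--         # Append the result for nearest smallest
--         nearest_smallest.append(str(smallest) if smallest is not None else "None")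
--
--         # Find nearest greatest
--         greatest = None
--         for num in arr:
--             if num > pair_sum:
--                 if greatest is None or num < greatest:
--                     greatest = num
--
--         # Append the result for nearest greatest
--         nearest_greatest.append(str(greatest) if greatest is not None else "None")
--
--     return [nearest_smallest, nearest_greatest]
-- ===== SOURCE B (Python) =====
-- from typing import List
-- from bisect import bisect_left, bisect_right
--
-- def nearest_smallest_and_greatest(arr: List[int]) -> List[List[str]]:
--     s = sorted(arr)
--     n = len(s)
--     nearest_smallest = []
--     nearest_greatest = []
--     for i in range(len(arr) - 1):
--         t = arr[i] + arr[i + 1]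
--         j = bisect_left(s, t)
--         nearest_smallest.append(str(s[j - 1]) if j > 0 else "None")
--         k = bisect_right(s, t)
--         nearest_greatest.append(str(s[k]) if k < n else "None")
--     return [nearest_smallest, nearest_greatest]
-- ===== Notes on version B (the rewrite author's own statement) =====
-- stated objective: faster
-- what changed: Instead of rescanning the whole array twice per adjacent pair to find the greatest element below and the least element above the pair sum, B sorts the array once and answers each pair with two binary searches (bisect_left/bisect_right) on the sorted copy.
import Mathlib
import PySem

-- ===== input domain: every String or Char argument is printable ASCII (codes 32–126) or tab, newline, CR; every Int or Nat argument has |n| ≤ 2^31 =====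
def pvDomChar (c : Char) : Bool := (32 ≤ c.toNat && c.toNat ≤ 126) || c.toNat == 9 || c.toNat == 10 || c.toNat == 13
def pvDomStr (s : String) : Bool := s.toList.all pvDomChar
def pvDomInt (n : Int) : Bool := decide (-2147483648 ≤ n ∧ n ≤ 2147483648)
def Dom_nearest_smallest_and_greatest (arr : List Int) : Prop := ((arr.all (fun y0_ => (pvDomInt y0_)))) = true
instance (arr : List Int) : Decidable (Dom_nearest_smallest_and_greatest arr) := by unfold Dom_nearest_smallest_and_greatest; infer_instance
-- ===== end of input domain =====

-- B replaces A's per-pair linear scans by one sort plus two binary searches per pair; objective: faster (asymptotic, O(n^2) → O(n log n)).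

-- ===== PORT A =====
-- inner loop "for num in arr: if num < pair_sum: …" (nearest smallest)
def nsgStepS (t : Int) (acc : Option Int) (num : Int) : Option Int :=
  if num < t then
    match acc with
    | none => some num
    | some m => if num > m then some num else acc
  else acc

-- inner loop "for num in arr: if num > pair_sum: …" (nearest greatest)
def nsgStepG (t : Int) (acc : Option Int) (num : Int) : Option Int :=
  if num > t then
    match acc with
    | none => some num
    | some m => if num < m then some num else acc
  else acc

def nearest_smallest_and_greatest (arr : List Int) : List (List String) :=
  let res := (PySem.List.pyRange 0 ((arr.length : Int) - 1) 1).foldl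
    (fun (acc : List String × List String) i =>
      let pairSum := PySem.List.pyGetD arr i 0 + PySem.List.pyGetD arr (i + 1) 0
      let smallest := arr.foldl (nsgStepS pairSum) none
      let ns := acc.1 ++ [match smallest with | some m => PySem.Int.toStr m | none => "None"]
      let greatest := arr.foldl (nsgStepG pairSum) none
      let ng := acc.2 ++ [match greatest with | some m => PySem.Int.toStr m | none => "None"]
      (ns, ng)) ([], [])
  [res.1, res.2]

-- ===== PORT B =====
def nearest_smallest_and_greatest_alt (arr : List Int) : List (List String) :=
  let s := PySem.List.sorted arr (fun x => x) false
  let n := s.length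
  let res := (PySem.List.pyRange 0 ((arr.length : Int) - 1) 1).foldl
    (fun (acc : List String × List String) i =>
      let t := PySem.List.pyGetD arr i 0 + PySem.List.pyGetD arr (i + 1) 0
      let j := PySem.List.bisectLeft s t
      let ns := acc.1 ++ [if 0 < j then PySem.Int.toStr (PySem.List.pyGetD s ((j : Int) - 1) 0) else "None"]
      let k := PySem.List.bisectRight s t
      let ng := acc.2 ++ [if k < n then PySem.Int.toStr (PySem.List.pyGetD s (k : Int) 0) else "None"]
      (ns, ng)) ([], [])
  [res.1, res.2]

-- ===== PRECONDITION & SPEC =====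
def Spec_nearest_smallest_and_greatest (arr : List Int) (out : List (List String)) : Prop := out = nearest_smallest_and_greatest_alt arr
instance (arr : List Int) (out : List (List String)) : Decidable (Spec_nearest_smallest_and_greatest arr out) := by unfold Spec_nearest_smallest_and_greatest; infer_instance

-- ===== CLAIM (what is proved, stated in full; the proofs are below) =====
def Claim_equal_nearest_smallest_and_greatest : Prop := ∀ (arr : List Int), Dom_nearest_smallest_and_greatest arr → Spec_nearest_smallest_and_greatest arr (nearest_smallest_and_greatest arr)

-- ===== LEMMAS AND PROOFS =====

theorem foldS_spec (t : Int) (l : List Int) : ∀ (acc : Option Int),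
    (l.foldl (nsgStepS t) acc = none ↔ acc = none ∧ ∀ y ∈ l, ¬ y < t) ∧
    (∀ m, l.foldl (nsgStepS t) acc = some m →
      ((m ∈ l ∧ m < t) ∨ acc = some m) ∧ (∀ y ∈ l, y < t → y ≤ m) ∧
      (∀ m0, acc = some m0 → m0 ≤ m)) := by
  induction l with
  | nil =>
    intro acc
    refine ⟨by simp, ?_⟩
    intro m hm
    simp only [List.foldl_nil] at hm
    subst hm
    exact ⟨Or.inr rfl, by simp, by intro m0 h; injection h with h; omega⟩
  | cons x xs ih =>
    intro acc
    simp only [List.foldl_cons]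
    by_cases hx : x < t
    · cases acc with
      | none =>
        have e : nsgStepS t none x = some x := by simp [nsgStepS, hx]
        rw [e]
        obtain ⟨ih1, ih2⟩ := ih (some x)
        refine ⟨by simp [ih1, hx], ?_⟩
        intro m hm
        obtain ⟨c1, c2, c3⟩ := ih2 m hm
        refine ⟨?_, ?_, ?_⟩
        · rcases c1 with ⟨h1, h2⟩ | h1
          · exact Or.inl ⟨List.mem_cons_of_mem _ h1, h2⟩
          · exact Or.inl ⟨by simp_all, by injection h1 with h1; omega⟩
        · intro y hy hyt
          rcases List.mem_cons.mp hy with rfl | h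
          · exact c3 y rfl
          · exact c2 y h hyt
        · intro m0 h; exact absurd h (by simp)
      | some a =>
        by_cases hgt : x > a
        · have e : nsgStepS t (some a) x = some x := by simp [nsgStepS, hx, hgt]
          rw [e]
          obtain ⟨ih1, ih2⟩ := ih (some x)
          refine ⟨by simp [ih1], ?_⟩
          intro m hm
          obtain ⟨c1, c2, c3⟩ := ih2 m hm
          refine ⟨?_, ?_, ?_⟩
          · rcases c1 with ⟨h1, h2⟩ | h1
            · exact Or.inl ⟨List.mem_cons_of_mem _ h1, h2⟩
            · exact Or.inl ⟨by simp_all, by injection h1 with h1; omega⟩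
          · intro y hy hyt
            rcases List.mem_cons.mp hy with rfl | h
            · exact c3 y rfl
            · exact c2 y h hyt
          · intro m0 h
            injection h with h
            have := c3 x rfl
            omega
        · have e : nsgStepS t (some a) x = some a := by simp [nsgStepS, hx, hgt]
          rw [e]
          obtain ⟨ih1, ih2⟩ := ih (some a)
          refine ⟨by simp [ih1], ?_⟩
          intro m hm
          obtain ⟨c1, c2, c3⟩ := ih2 m hm
          refine ⟨?_, ?_, ?_⟩
          · rcases c1 with ⟨h1, h2⟩ | h1
            · exact Or.inl ⟨List.mem_cons_of_mem _ h1, h2⟩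
            · exact Or.inr h1
          · intro y hy hyt
            rcases List.mem_cons.mp hy with rfl | h
            · have := c3 a rfl; omega
            · exact c2 y h hyt
          · exact c3
    · have e : nsgStepS t acc x = acc := by simp [nsgStepS, hx]
      rw [e]
      obtain ⟨ih1, ih2⟩ := ih acc
      refine ⟨by rw [ih1]; simp; intro _ _; omega, ?_⟩
      intro m hm
      obtain ⟨c1, c2, c3⟩ := ih2 m hm
      refine ⟨?_, ?_, c3⟩
      · rcases c1 with ⟨h1, h2⟩ | h1
        · exact Or.inl ⟨List.mem_cons_of_mem _ h1, h2⟩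
        · exact Or.inr h1
      · intro y hy hyt
        rcases List.mem_cons.mp hy with rfl | h
        · exact absurd hyt hx
        · exact c2 y h hyt

theorem perSumS (arr : List Int) (t : Int) :
    arr.foldl (nsgStepS t) none =
      (if 0 < PySem.List.bisectLeft (PySem.List.sorted arr (fun x => x) false) t
       then some (PySem.List.pyGetD (PySem.List.sorted arr (fun x => x) false)
              ((PySem.List.bisectLeft (PySem.List.sorted arr (fun x => x) false) t : Int) - 1) 0)
       else none) := by
  set s := PySem.List.sorted arr (fun x => x) false with hs
  have hperm : s.Perm arr := PySem.List.sorted_perm arr (fun x => x) false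
  have hpair : s.Pairwise (fun a b => a ≤ b) := PySem.List.sorted_pairwise arr (fun x => x)
  obtain ⟨hle, hlt, hge⟩ := PySem.List.bisectLeft_spec s t hpair
  set j := PySem.List.bisectLeft s t with hj
  have hidx : ∀ i k (hi : i < s.length) (hk : k < s.length), i ≤ k → s[i] ≤ s[k] := by
    intro i k hi hk hik
    rcases lt_or_eq_of_le hik with h | h
    · exact (List.pairwise_iff_getElem.mp hpair) i k hi hk h
    · subst h; rfl
  by_cases h0 : 0 < j
  · have hjlen : j - 1 < s.length := by omega
    have hget : PySem.List.pyGetD s ((j : Int) - 1) 0 = s[j-1] := by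
      have := PySem.List.pyGetD_eq_getElem (xs := s) (i := (j : Int) - 1) (d := 0)
        (by omega) (by omega)
      rw [this]
      congr 1
      omega
    rw [if_pos h0, hget]
    rcases hfold : arr.foldl (nsgStepS t) none with _ | m
    · exfalso
      have hall := ((foldS_spec t arr none).1.mp hfold).2
      have hmem : s[j-1] ∈ arr := hperm.subset (List.getElem_mem hjlen)
      exact hall _ hmem (hlt (j-1) hjlen (by omega))
    · obtain ⟨c1, c2, _⟩ := (foldS_spec t arr none).2 m hfold
      rcases c1 with ⟨hmarr, hmt⟩ | hcontra
      swap
      · exact absurd hcontra (by simp)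
      have hms : m ∈ s := hperm.mem_iff.mpr hmarr
      obtain ⟨i, hi, hieq⟩ := List.mem_iff_getElem.mp hms
      have hij : i < j := by
        by_contra hc
        have := hge i hi (by omega)
        omega
      have h1 : m ≤ s[j-1] := hieq ▸ hidx i (j-1) hi hjlen (by omega)
      have h2 : s[j-1] ≤ m :=
        c2 _ (hperm.subset (List.getElem_mem hjlen)) (hlt (j-1) hjlen (by omega))
      rw [show m = s[j-1] by omega]
  · rw [if_neg h0]
    rw [(foldS_spec t arr none).1]
    refine ⟨rfl, ?_⟩
    intro y hy
    obtain ⟨i, hi, hieq⟩ := List.mem_iff_getElem.mp (hperm.mem_iff.mpr hy)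
    have := hge i hi (by omega)
    omega

theorem foldG_spec (t : Int) (l : List Int) : ∀ (acc : Option Int),
    (l.foldl (nsgStepG t) acc = none ↔ acc = none ∧ ∀ y ∈ l, ¬ y > t) ∧
    (∀ m, l.foldl (nsgStepG t) acc = some m →
      ((m ∈ l ∧ m > t) ∨ acc = some m) ∧ (∀ y ∈ l, y > t → m ≤ y) ∧
      (∀ m0, acc = some m0 → m ≤ m0)) := by
  induction l with
  | nil =>
    intro acc
    refine ⟨by simp, ?_⟩
    intro m hm
    simp only [List.foldl_nil] at hm
    subst hm
    exact ⟨Or.inr rfl, by simp, by intro m0 h; injection h with h; omega⟩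
  | cons x xs ih =>
    intro acc
    simp only [List.foldl_cons]
    by_cases hx : x > t
    · cases acc with
      | none =>
        have e : nsgStepG t none x = some x := by simp [nsgStepG, hx]
        rw [e]
        obtain ⟨ih1, ih2⟩ := ih (some x)
        refine ⟨by simp [ih1, hx], ?_⟩
        intro m hm
        obtain ⟨c1, c2, c3⟩ := ih2 m hm
        refine ⟨?_, ?_, ?_⟩
        · rcases c1 with ⟨h1, h2⟩ | h1
          · exact Or.inl ⟨List.mem_cons_of_mem _ h1, h2⟩
          · exact Or.inl ⟨by simp_all, by injection h1 with h1; omega⟩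
        · intro y hy hyt
          rcases List.mem_cons.mp hy with rfl | h
          · exact c3 y rfl
          · exact c2 y h hyt
        · intro m0 h; exact absurd h (by simp)
      | some a =>
        by_cases hgt : x < a
        · have e : nsgStepG t (some a) x = some x := by simp [nsgStepG, hx, hgt]
          rw [e]
          obtain ⟨ih1, ih2⟩ := ih (some x)
          refine ⟨by simp [ih1], ?_⟩
          intro m hm
          obtain ⟨c1, c2, c3⟩ := ih2 m hm
          refine ⟨?_, ?_, ?_⟩
          · rcases c1 with ⟨h1, h2⟩ | h1
            · exact Or.inl ⟨List.mem_cons_of_mem _ h1, h2⟩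
            · exact Or.inl ⟨by simp_all, by injection h1 with h1; omega⟩
          · intro y hy hyt
            rcases List.mem_cons.mp hy with rfl | h
            · exact c3 y rfl
            · exact c2 y h hyt
          · intro m0 h
            injection h with h
            have := c3 x rfl
            omega
        · have e : nsgStepG t (some a) x = some a := by simp [nsgStepG, hx, hgt]
          rw [e]
          obtain ⟨ih1, ih2⟩ := ih (some a)
          refine ⟨by simp [ih1], ?_⟩
          intro m hm
          obtain ⟨c1, c2, c3⟩ := ih2 m hm
          refine ⟨?_, ?_, ?_⟩
          · rcases c1 with ⟨h1, h2⟩ | h1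
            · exact Or.inl ⟨List.mem_cons_of_mem _ h1, h2⟩
            · exact Or.inr h1
          · intro y hy hyt
            rcases List.mem_cons.mp hy with rfl | h
            · have := c3 a rfl; omega
            · exact c2 y h hyt
          · exact c3
    · have e : nsgStepG t acc x = acc := by simp [nsgStepG, hx]
      rw [e]
      obtain ⟨ih1, ih2⟩ := ih acc
      refine ⟨by rw [ih1]; simp; intro _ _; omega, ?_⟩
      intro m hm
      obtain ⟨c1, c2, c3⟩ := ih2 m hm
      refine ⟨?_, ?_, c3⟩
      · rcases c1 with ⟨h1, h2⟩ | h1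
        · exact Or.inl ⟨List.mem_cons_of_mem _ h1, h2⟩
        · exact Or.inr h1
      · intro y hy hyt
        rcases List.mem_cons.mp hy with rfl | h
        · exact absurd hyt hx
        · exact c2 y h hyt

theorem perSumG (arr : List Int) (t : Int) :
    arr.foldl (nsgStepG t) none =
      (if PySem.List.bisectRight (PySem.List.sorted arr (fun x => x) false) t <
          (PySem.List.sorted arr (fun x => x) false).length
       then some (PySem.List.pyGetD (PySem.List.sorted arr (fun x => x) false)
              ((PySem.List.bisectRight (PySem.List.sorted arr (fun x => x) false) t : Int)) 0)
       else none) := by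
  set s := PySem.List.sorted arr (fun x => x) false with hs
  have hperm : s.Perm arr := PySem.List.sorted_perm arr (fun x => x) false
  have hpair : s.Pairwise (fun a b => a ≤ b) := PySem.List.sorted_pairwise arr (fun x => x)
  obtain ⟨hle, hlt, hge⟩ := PySem.List.bisectRight_spec s t hpair
  set k := PySem.List.bisectRight s t with hk
  have hidx : ∀ i l2 (hi : i < s.length) (hl : l2 < s.length), i ≤ l2 → s[i] ≤ s[l2] := by
    intro i l2 hi hl hil
    rcases lt_or_eq_of_le hil with h | h
    · exact (List.pairwise_iff_getElem.mp hpair) i l2 hi hl h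
    · subst h; rfl
  by_cases h0 : k < s.length
  · have hget : PySem.List.pyGetD s (k : Int) 0 = s[k] := by
      have := PySem.List.pyGetD_eq_getElem (xs := s) (i := (k : Int)) (d := 0)
        (by omega) (by omega)
      rw [this]
      simp
    rw [if_pos h0, hget]
    rcases hfold : arr.foldl (nsgStepG t) none with _ | m
    · exfalso
      have hall := ((foldG_spec t arr none).1.mp hfold).2
      have hmem : s[k] ∈ arr := hperm.subset (List.getElem_mem h0)
      exact hall _ hmem (hge k h0 (by omega))
    · obtain ⟨c1, c2, _⟩ := (foldG_spec t arr none).2 m hfold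
      rcases c1 with ⟨hmarr, hmt⟩ | hcontra
      swap
      · exact absurd hcontra (by simp)
      have hms : m ∈ s := hperm.mem_iff.mpr hmarr
      obtain ⟨i, hi, hieq⟩ := List.mem_iff_getElem.mp hms
      have hik : k ≤ i := by
        by_contra hc
        have := hlt i hi (by omega)
        omega
      have h1 : s[k] ≤ m := hieq ▸ hidx k i h0 hi hik
      have h2 : m ≤ s[k] :=
        c2 _ (hperm.subset (List.getElem_mem h0)) (hge k h0 (by omega))
      rw [show m = s[k] by omega]
  · rw [if_neg h0]
    rw [(foldG_spec t arr none).1]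
    refine ⟨rfl, ?_⟩
    intro y hy
    obtain ⟨i, hi, hieq⟩ := List.mem_iff_getElem.mp (hperm.mem_iff.mpr hy)
    have := hlt i hi (by omega)
    omega

-- ===== VERDICT (by name: the statement is the Claim_ definition above) =====
theorem nearest_smallest_and_greatest_spec : Claim_equal_nearest_smallest_and_greatest := by
  intro arr _
  unfold Spec_nearest_smallest_and_greatest nearest_smallest_and_greatest nearest_smallest_and_greatest_alt
  have hstep : ∀ (acc : List String × List String) (i : Int),
      (fun (acc : List String × List String) i =>
        let pairSum := PySem.List.pyGetD arr i 0 + PySem.List.pyGetD arr (i + 1) 0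
        let smallest := arr.foldl (nsgStepS pairSum) none
        let ns := acc.1 ++ [match smallest with | some m => PySem.Int.toStr m | none => "None"]
        let greatest := arr.foldl (nsgStepG pairSum) none
        let ng := acc.2 ++ [match greatest with | some m => PySem.Int.toStr m | none => "None"]
        (ns, ng)) acc i =
      (fun (acc : List String × List String) i =>
        let t := PySem.List.pyGetD arr i 0 + PySem.List.pyGetD arr (i + 1) 0
        let j := PySem.List.bisectLeft (PySem.List.sorted arr (fun x => x) false) t
        let ns := acc.1 ++ [if 0 < j then PySem.Int.toStr (PySem.List.pyGetD (PySem.List.sorted arr (fun x => x) false) ((j : Int) - 1) 0) else "None"]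
        let k := PySem.List.bisectRight (PySem.List.sorted arr (fun x => x) false) t
        let ng := acc.2 ++ [if k < (PySem.List.sorted arr (fun x => x) false).length then PySem.Int.toStr (PySem.List.pyGetD (PySem.List.sorted arr (fun x => x) false) (k : Int) 0) else "None"]
        (ns, ng)) acc i := by
    intro acc i
    simp only
    rw [perSumS arr (PySem.List.pyGetD arr i 0 + PySem.List.pyGetD arr (i + 1) 0),
        perSumG arr (PySem.List.pyGetD arr i 0 + PySem.List.pyGetD arr (i + 1) 0)]
    split_ifs <;> rfl
  simp only
  rw [funext (fun acc => funext (fun i => hstep acc i))]
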